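-- pv_equiv track=rewrite | github.com/FiveNine/AdventOfCode2023 | day-3/part1.py | GetRightDigits
-- ===== SOURCE A (Python) =====
-- def GetRightDigits(row, numberIndex):
--     digits = ''
--     startIndex = numberIndex[1]+1
--     if startIndex < len(row):
--         for char in row[startIndex:]:
--             if char.isdigit():
--                 digits += char
--             else:
--                 break
--     return digits
-- ===== SOURCE B (Python) =====
-- def GetRightDigits(row, numberIndex):
--     s = row[numberIndex[1]+1:]
--     stop = next((i for i, c in enumerate(s) if not c.isdigit()), len(s))
--     return s[:stop]
-- ===== Notes on version B (the rewrite author's own statement) =====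
-- stated objective: idiomatic
-- what changed: Replaces A's explicit bounds guard and accumulate-with-break loop by taking the suffix slice, finding the first non-digit index with next(enumerate-generator, len), and returning the prefix slice up to it.
import Mathlib
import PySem

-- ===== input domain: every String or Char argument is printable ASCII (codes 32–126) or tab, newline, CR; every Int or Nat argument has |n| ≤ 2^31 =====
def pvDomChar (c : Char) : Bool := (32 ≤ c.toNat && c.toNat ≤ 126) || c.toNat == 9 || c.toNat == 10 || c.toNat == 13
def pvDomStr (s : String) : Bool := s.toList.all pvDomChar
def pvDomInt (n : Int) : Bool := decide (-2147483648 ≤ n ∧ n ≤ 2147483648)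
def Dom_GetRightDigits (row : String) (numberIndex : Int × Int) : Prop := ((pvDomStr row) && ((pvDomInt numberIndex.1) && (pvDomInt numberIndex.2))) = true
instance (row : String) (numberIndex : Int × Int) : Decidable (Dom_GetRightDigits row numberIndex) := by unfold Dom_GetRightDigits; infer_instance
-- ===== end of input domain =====

-- B replaces A's guard + accumulate-with-break loop by slice / first-non-digit index / prefix slice (idiomatic; same cost).

-- ===== PORT A =====
-- for char in row[startIndex:]: accumulate digits, break at first non-digit
def pvLoopA : List Char → List Char → List Char
  | [], digits => digits
  | c :: rest, digits =>
    if PySem.Chars.isdigit c then pvLoopA rest (digits ++ [c]) else digits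

def GetRightDigits (row : String) (numberIndex : Int × Int) : String :=
  let digits : List Char := []
  let startIndex := numberIndex.2 + 1
  if startIndex < (row.toList.length : Int) then
    String.mk (pvLoopA (PySem.List.slice row.toList (some startIndex) none) digits)
  else
    String.mk digits

-- ===== PORT B =====
def GetRightDigits_alt (row : String) (numberIndex : Int × Int) : String :=
  let s := PySem.List.slice row.toList (some (numberIndex.2 + 1)) none
  -- next((i for i, c in enumerate(s) if not c.isdigit()), len(s))
  let stop := (s.findIdx? (fun c => !PySem.Chars.isdigit c)).getD s.length
  String.mk (s.take stop)

-- ===== PRECONDITION & SPEC =====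
def Spec_GetRightDigits (row : String) (numberIndex : Int × Int) (out : String) : Prop := out = GetRightDigits_alt row numberIndex
instance (row : String) (numberIndex : Int × Int) (out : String) : Decidable (Spec_GetRightDigits row numberIndex out) := by unfold Spec_GetRightDigits; infer_instance

-- ===== CLAIM (what is proved, stated in full; the proofs are below) =====
def Claim_equal_GetRightDigits : Prop := ∀ (row : String) (numberIndex : Int × Int), Dom_GetRightDigits row numberIndex → Spec_GetRightDigits row numberIndex (GetRightDigits row numberIndex)

-- ===== LEMMAS AND PROOFS =====
def pvStop (s : List Char) : Nat := (s.findIdx? (fun c => !PySem.Chars.isdigit c)).getD s.length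

theorem pvLoopA_eq_take_stop (s acc : List Char) :
    pvLoopA s acc = acc ++ s.take (pvStop s) := by
  induction s generalizing acc with
  | nil => simp [pvLoopA, pvStop]
  | cons c t ih =>
    by_cases h : PySem.Chars.isdigit c = true
    · simp [pvLoopA, pvStop, h, List.findIdx?_cons, ih]
    · simp [pvLoopA, pvStop, h, List.findIdx?_cons]

theorem pv_slice_empty_of_ge (xs : List Char) (a : Int) (h : (xs.length : Int) ≤ a) :
    PySem.List.slice xs (some a) none = [] := by
  rw [PySem.List.slice_some_none]
  have : PySem.List.clampIdx xs.length a = xs.length := by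
    unfold PySem.List.clampIdx
    split_ifs <;> omega
  simp [this]

-- ===== VERDICT (by name: the statement is the Claim_ definition above) =====
theorem GetRightDigits_spec : Claim_equal_GetRightDigits := by
  intro row numberIndex _
  unfold Spec_GetRightDigits GetRightDigits GetRightDigits_alt
  by_cases h : numberIndex.2 + 1 < (row.toList.length : Int)
  · simp only [h, if_pos]
    rw [pvLoopA_eq_take_stop]
    rfl
  · simp only [h, if_neg, not_false_iff]
    rw [pv_slice_empty_of_ge _ _ (by omega)]
    simp
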